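-- pv_equiv track=rewrite | github.com/kenanboracic4/AdventOfCode | Day 3/z2.py | pronadji_najveci_podniz
-- ===== SOURCE A (Python) =====
-- def pronadji_najveci_podniz(banka_linija, ciljana_duzina):
--
--
--
--     N = len(banka_linija)
--
--     K = N - ciljana_duzina
--
--
--     if N < ciljana_duzina:
--         return 0
--
--     rezultat = []
--
--     for cifra in banka_linija:
--
--
--         while K > 0 and rezultat and cifra > rezultat[-1]:
--             rezultat.pop()
--             K -= 1
--
--         rezultat.append(cifra)
--
--
--     if K > 0:
--         rezultat = rezultat[:-K]
--
--
--     return "".join(rezultat)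
-- ===== SOURCE B (Python) =====
-- def pronadji_najveci_podniz(banka_linija, ciljana_duzina):
--     # Greedy windowed selection: for each output slot pick the leftmost maximum
--     # element in the window that still leaves enough elements for the rest.
--     N = len(banka_linija)
--     start = 0
--     result = []
--     for i in range(ciljana_duzina):
--         end = N - (ciljana_duzina - i)  # inclusive window end
--         best = start
--         for j in range(start + 1, end + 1):
--             if banka_linija[j] > banka_linija[best]:
--                 best = j
--         result.append(banka_linija[best])
--         start = best + 1
--     return "".join(result)
-- ===== Notes on version B (the rewrite author's own statement) =====
-- stated objective: alternative
-- what changed: Replaces the single-pass monotonic stack with bounded pops by greedy windowed selection: for each of the L output slots it scans the window that still leaves enough elements and picks the leftmost maximum, so no stack is maintained at all.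
-- outside the precondition, e.g. on pronadji_najveci_podniz(['5'], 2): A returns 0, B raises IndexError; on pronadji_najveci_podniz([], 1): A returns 0, B raises IndexError
import Mathlib
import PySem

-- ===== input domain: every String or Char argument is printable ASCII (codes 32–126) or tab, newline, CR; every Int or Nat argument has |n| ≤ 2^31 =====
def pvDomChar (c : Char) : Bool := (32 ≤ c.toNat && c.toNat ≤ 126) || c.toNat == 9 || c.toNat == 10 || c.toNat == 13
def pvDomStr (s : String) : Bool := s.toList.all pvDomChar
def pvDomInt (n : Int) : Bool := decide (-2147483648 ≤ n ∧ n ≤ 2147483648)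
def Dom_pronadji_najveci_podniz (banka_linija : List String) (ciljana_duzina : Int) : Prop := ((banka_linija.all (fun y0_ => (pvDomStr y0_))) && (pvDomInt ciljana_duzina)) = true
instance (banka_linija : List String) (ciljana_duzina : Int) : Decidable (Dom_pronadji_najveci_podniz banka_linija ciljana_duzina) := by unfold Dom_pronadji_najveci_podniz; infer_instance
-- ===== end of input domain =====

-- B replaces A's monotonic stack by greedy windowed leftmost-maximum selection
-- (a genuinely different algorithm of similar size; not claimed faster).

-- ===== PORT A =====
-- the inner `while K > 0 and rezultat and cifra > rezultat[-1]: rezultat.pop(); K -= 1`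
def pvWhilePop (rezultat : List String) (K : Int) (cifra : String) : List String × Int :=
  if h : 0 < K ∧ rezultat ≠ [] ∧ PySem.List.pyGetD rezultat (-1) "" < cifra then
    pvWhilePop rezultat.dropLast (K - 1) cifra
  else (rezultat, K)
termination_by rezultat.length
decreasing_by
  simp only [List.length_dropLast]
  have := List.length_pos_iff.mpr h.2.1
  omega

def pronadji_najveci_podniz (banka_linija : List String) (ciljana_duzina : Int) : String :=
  let N : Int := banka_linija.length
  let K : Int := N - ciljana_duzina
  if N < ciljana_duzina then ""   -- Python A returns the int 0 (not a str) here; excluded by Pre_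
  else
    let rk := banka_linija.foldl
      (fun (st : List String × Int) cifra =>
        let p := pvWhilePop st.1 st.2 cifra
        (p.1 ++ [cifra], p.2)) ([], K)
    let rezultat := if 0 < rk.2 then PySem.List.slice rk.1 none (some (-rk.2)) else rk.1
    PySem.Str.join "" rezultat

-- ===== PORT B =====
def pronadji_najveci_podniz_alt (banka_linija : List String) (ciljana_duzina : Int) : String :=
  let N : Int := banka_linija.length
  let st := (PySem.List.pyRange 0 ciljana_duzina 1).foldl
    (fun (st : Int × List String) i =>
      let start := st.1
      let endIdx := N - (ciljana_duzina - i)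
      let best := (PySem.List.pyRange (start + 1) (endIdx + 1) 1).foldl
        (fun best j =>
          if PySem.List.pyGetD banka_linija best "" < PySem.List.pyGetD banka_linija j "" then j
          else best) start
      (best + 1, st.2 ++ [PySem.List.pyGetD banka_linija best ""])) (0, [])
  PySem.Str.join "" st.2

-- ===== PRECONDITION & SPEC =====
-- Pre_ excludes exactly A's guard `if N < ciljana_duzina: return 0`, on which Python A
-- returns the int 0 — not a value of the declared str return type; B raises IndexError there.
def Pre_pronadji_najveci_podniz (banka_linija : List String) (ciljana_duzina : Int) : Prop :=
  ciljana_duzina ≤ (banka_linija.length : Int)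
instance (banka_linija : List String) (ciljana_duzina : Int) : Decidable (Pre_pronadji_najveci_podniz banka_linija ciljana_duzina) := by unfold Pre_pronadji_najveci_podniz; infer_instance

def pvWitness_pronadji_najveci_podniz : List String × Int := (["b", "a", "c"], 2)

def Spec_pronadji_najveci_podniz (banka_linija : List String) (ciljana_duzina : Int) (out : String) : Prop := out = pronadji_najveci_podniz_alt banka_linija ciljana_duzina
instance (banka_linija : List String) (ciljana_duzina : Int) (out : String) : Decidable (Spec_pronadji_najveci_podniz banka_linija ciljana_duzina out) := by unfold Spec_pronadji_najveci_podniz; infer_instance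

-- ===== CLAIM (what is proved, stated in full; the proofs are below) =====
def Claim_equal_pronadji_najveci_podniz : Prop := ∀ (banka_linija : List String) (ciljana_duzina : Int), Dom_pronadji_najveci_podniz banka_linija ciljana_duzina → Pre_pronadji_najveci_podniz banka_linija ciljana_duzina → Spec_pronadji_najveci_podniz banka_linija ciljana_duzina (pronadji_najveci_podniz banka_linija ciljana_duzina)

-- ===== LEMMAS AND PROOFS =====

-- Model of A's stack loop with the stack reversed (top first) and a Nat budget.
def popR (s : List String) (k : Nat) (c : String) : List String × Nat :=
  match s, k with
  | _, 0 => (s, 0)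
  | [], k => ([], k)
  | t :: r, Nat.succ k => if t < c then popR r k c else (t :: r, k + 1)

theorem popR_shape (s : List String) (k : Nat) (c : String) :
    ∃ q, q ≤ s.length ∧ q ≤ k ∧ popR s k c = (s.drop q, k - q) := by
  induction s generalizing k with
  | nil => exact ⟨0, by cases k <;> simp [popR]⟩
  | cons t r ih =>
    cases k with
    | zero => exact ⟨0, by simp [popR]⟩
    | succ k =>
      by_cases h : t < c
      · obtain ⟨q, hq1, hq2, hq3⟩ := ih k
        exact ⟨q + 1, by simpa using hq1, by omega, by simp [popR, h, hq3, Nat.succ_sub_succ]⟩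
      · exact ⟨0, by simp [popR, h]⟩

theorem popR_all (s : List String) (k : Nat) (c : String)
    (h : ∀ y ∈ s, y < c) (hk : s.length ≤ k) : popR s k c = ([], k - s.length) := by
  induction s generalizing k with
  | nil => cases k <;> simp [popR]
  | cons t r ih =>
    cases k with
    | zero => simp at hk
    | succ k =>
      have ht : t < c := h t (by simp)
      simp only [popR, if_pos ht]
      rw [ih k (fun y hy => h y (List.mem_cons_of_mem _ hy)) (by simpa using hk)]
      simp [Nat.succ_sub_succ]

theorem popR_append (s : List String) (k : Nat) (c y : String)
    (hc : s.length < k → y ≤ c) :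
    popR (s ++ [c]) k y = ((popR s k y).1 ++ [c], (popR s k y).2) := by
  induction s generalizing k with
  | nil =>
    cases k with
    | zero => simp [popR]
    | succ k =>
      have : ¬ c < y := not_lt.mpr (hc (by simp))
      simp [popR, this]
  | cons t r ih =>
    cases k with
    | zero => simp [popR]
    | succ k =>
      by_cases h : t < y
      · simp only [List.cons_append, popR, if_pos h]
        exact ih k (fun hl => hc (by simpa using Nat.succ_lt_succ hl))
      · simp [popR, h]

def runR (stk : List String) (cs : List String) (k : Nat) : List String × Nat :=
  match cs with
  | [] => (stk, k)
  | c :: cs =>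
    let p := popR stk k c
    runR (c :: p.1) cs p.2

def resA (cs : List String) (k : Nat) : List String :=
  let p := runR [] cs k
  (p.1.drop p.2).reverse

theorem run_len (cs : List String) : ∀ (s : List String) (k : Nat),
    (runR s cs k).2 ≤ k ∧ (runR s cs k).1.length + k = s.length + cs.length + (runR s cs k).2 := by
  induction cs with
  | nil => intro s k; simp [runR]
  | cons c cs ih =>
    intro s k
    obtain ⟨q, hq1, hq2, hq3⟩ := popR_shape s k c
    have h := ih (c :: (popR s k c).1) (popR s k c).2
    simp only [runR]
    constructor
    · exact le_trans h.1 (by rw [hq3]; omega)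
    · have hlen : (popR s k c).1.length = s.length - q := by rw [hq3]; simp
      have hk2 : (popR s k c).2 = k - q := by rw [hq3]
      have := h.2
      simp only [List.length_cons] at this ⊢
      omega

theorem resA_big (cs : List String) (k : Nat) (h : cs.length ≤ k) : resA cs k = [] := by
  have h2 := run_len cs [] k
  simp only [List.length_nil] at h2
  show (List.drop (runR [] cs k).2 (runR [] cs k).1).reverse = []
  rw [List.drop_eq_nil_iff.mpr (by omega)]
  simp

theorem prefix_run (pre : List String) : ∀ (s : List String) (k : Nat) (c : String) (rest : List String),
    (∀ y ∈ s, y < c) → (∀ y ∈ pre, y < c) → s.length + pre.length ≤ k →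
    runR s (pre ++ c :: rest) k = runR [c] rest (k - (s.length + pre.length)) := by
  induction pre with
  | nil =>
    intro s k c rest hs _ hk
    simp only [List.nil_append, runR]
    rw [popR_all s k c hs (by simpa using hk)]
    simp
  | cons y pre ih =>
    intro s k c rest hs hpre hk
    simp only [List.cons_append, runR]
    obtain ⟨q, hq1, hq2, hq3⟩ := popR_shape s k y
    rw [hq3]
    have := ih (y :: s.drop q) (k - q) c rest
      (by intro z hz
          rcases List.mem_cons.mp hz with h | h
          · exact h ▸ hpre y (by simp)
          · exact hs z (List.mem_of_mem_drop h))
      (fun z hz => hpre z (by simp [hz]))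
      (by simp only [List.length_cons, List.length_drop]
          simp only [List.length_cons] at hk; omega)
    rw [this]
    congr 1
    simp only [List.length_cons, List.length_drop]
    simp only [List.length_cons] at hk
    omega

theorem shield (ys : List String) : ∀ (s : List String) (k : Nat) (c : String),
    (∀ i, i + s.length < k → ys.getD i "" ≤ c) →
    runR (s ++ [c]) ys k = ((runR s ys k).1 ++ [c], (runR s ys k).2) := by
  induction ys with
  | nil => intro s k c _; simp [runR]
  | cons y ys ih =>
    intro s k c hyp
    simp only [runR]
    rw [popR_append s k c y (fun hl => by simpa using hyp 0 (by simpa using hl))]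
    obtain ⟨q, hq1, hq2, hq3⟩ := popR_shape s k y
    have := ih (y :: (popR s k y).1) (popR s k y).2 c
      (by intro i hi
          rw [hq3] at hi
          simp only [List.length_cons, List.length_drop] at hi
          have h2 : (i + 1) + s.length < k := by omega
          simpa using hyp (i + 1) h2)
    simpa using this

-- Spec of B's inner loop: leftmost argmax index of xs over [j, fin], seeded with best.
def argAux (xs : List String) (best j fin : Nat) : Nat :=
  if j ≤ fin then
    argAux xs (if xs.getD best "" < xs.getD j "" then j else best) (j + 1) fin
  else best
termination_by fin + 1 - j

-- Spec of B's outer loop: greedy windowed selection.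
def gsel (xs : List String) (start : Nat) : Nat → List String
  | 0 => []
  | l + 1 =>
    let b := argAux xs start (start + 1) (xs.length - (l + 1))
    xs.getD b "" :: gsel xs (b + 1) l

theorem argAux_spec (xs : List String) (fin : Nat) : ∀ (n j best : Nat), fin + 1 - j = n → best < j →
    (argAux xs best j fin = best ∨ (j ≤ argAux xs best j fin ∧ argAux xs best j fin ≤ fin)) ∧
    (∀ i, j ≤ i → i ≤ fin → xs.getD i "" ≤ xs.getD (argAux xs best j fin) "") ∧
    (xs.getD best "" ≤ xs.getD (argAux xs best j fin) "") ∧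
    (argAux xs best j fin ≠ best → xs.getD best "" < xs.getD (argAux xs best j fin) "") ∧
    (∀ i, j ≤ i → i < argAux xs best j fin → xs.getD i "" < xs.getD (argAux xs best j fin) "") := by
  intro n
  induction n with
  | zero =>
    intro j best hn hbj
    have hj : ¬ j ≤ fin := by omega
    rw [argAux, if_neg hj]
    refine ⟨Or.inl rfl, ?_, le_refl _, fun h => absurd rfl h, ?_⟩
    · intro i h1 h2; omega
    · intro i h1 h2; omega
  | succ n ih =>
    intro j best hn hbj
    by_cases hj : j ≤ fin
    · rw [argAux, if_pos hj]
      by_cases hlt : xs.getD best "" < xs.getD j ""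
      · rw [if_pos hlt]
        obtain ⟨i1, i2, i3, i4, i5⟩ := ih (j + 1) j (by omega) (by omega)
        refine ⟨?_, ?_, ?_, ?_, ?_⟩
        · rcases i1 with h | h
          · exact Or.inr ⟨by omega, by omega⟩
          · exact Or.inr ⟨by omega, by omega⟩
        · intro i h1 h2
          rcases Nat.eq_or_lt_of_le h1 with h | h
          · exact h ▸ i3
          · exact i2 i h h2
        · exact le_of_lt (lt_of_lt_of_le hlt i3)
        · intro _; exact lt_of_lt_of_le hlt i3
        · intro i h1 h2
          rcases Nat.eq_or_lt_of_le h1 with h | h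
          · subst h
            have hne : argAux xs j (j + 1) fin ≠ j := by omega
            exact i4 hne
          · exact i5 i h h2
      · rw [if_neg hlt]
        obtain ⟨i1, i2, i3, i4, i5⟩ := ih (j + 1) best (by omega) (by omega)
        refine ⟨?_, ?_, i3, i4, ?_⟩
        · rcases i1 with h | h
          · exact Or.inl h
          · exact Or.inr ⟨by omega, h.2⟩
        · intro i h1 h2
          rcases Nat.eq_or_lt_of_le h1 with h | h
          · subst h
            exact le_trans (not_lt.mp hlt) i3
          · exact i2 i h h2
        · intro i h1 h2
          rcases Nat.eq_or_lt_of_le h1 with h | h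
          · subst h
            by_cases hb : argAux xs best (j + 1) fin = best
            · omega
            · exact lt_of_le_of_lt (not_lt.mp hlt) (i4 hb)
          · exact i5 i h h2
    · rw [argAux, if_neg hj]
      refine ⟨Or.inl rfl, ?_, le_refl _, fun h => absurd rfl h, ?_⟩
      · intro i h1 h2; omega
      · intro i h1 h2; omega

theorem stack_eq_gsel (xs : List String) : ∀ (l start : Nat), start + l ≤ xs.length →
    resA (xs.drop start) (xs.length - start - l) = gsel xs start l := by
  intro l
  induction l with
  | zero =>
    intro start h
    rw [gsel]
    exact resA_big _ _ (by simp)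
  | succ l ih =>
    intro start h
    have hfin : start ≤ xs.length - (l + 1) := by omega
    set fin := xs.length - (l + 1) with hfin_def
    have hflen : fin < xs.length := by omega
    set b := argAux xs start (start + 1) fin with hb_def
    obtain ⟨i1, i2, i3, i4, i5⟩ :=
      argAux_spec xs fin (fin + 1 - (start + 1)) (start + 1) start rfl (by omega)
    have hb1 : start ≤ b := by rcases i1 with h' | h' <;> omega
    have hb2 : b ≤ fin := by rcases i1 with h' | h' <;> omega
    have hblen : b < xs.length := by omega
    have habs_lt : ∀ i, start ≤ i → i < b → xs.getD i "" < xs.getD b "" := by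
      intro i hi1 hi2
      rcases Nat.eq_or_lt_of_le hi1 with h' | h'
      · exact h' ▸ i4 (by omega)
      · exact i5 i h' hi2
    have habs_le : ∀ i, start ≤ i → i ≤ fin → xs.getD i "" ≤ xs.getD b "" := by
      intro i hi1 hi2
      rcases Nat.eq_or_lt_of_le hi1 with h' | h'
      · exact h' ▸ i3
      · exact i2 i h' hi2
    set c := xs.getD b "" with hc_def
    set pre := (xs.drop start).take (b - start) with hpre_def
    set rest := xs.drop (b + 1) with hrest_def
    have hpre_len : pre.length = b - start := by
      simp [hpre_def]; omega
    have hdecomp : xs.drop start = pre ++ c :: rest := by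
      rw [hpre_def, hrest_def, hc_def]
      rw [List.getD_eq_getElem _ _ hblen]
      conv_lhs => rw [← List.take_append_drop (b - start) (xs.drop start)]
      congr 1
      rw [List.drop_drop]
      have h2 : start + (b - start) = b := by omega
      rw [h2, List.drop_eq_getElem_cons hblen]
    have hpre_mem : ∀ y ∈ pre, y < c := by
      intro y hy
      obtain ⟨i, hilt, hieq⟩ := List.mem_iff_getElem.mp hy
      have hi2 : i < b - start := hpre_len ▸ hilt
      simp only [hpre_def, List.getElem_take, List.getElem_drop] at hieq
      rw [← hieq]
      have := habs_lt (start + i) (by omega) (by omega)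
      rwa [List.getD_eq_getElem _ _ (by omega)] at this
    have hKm : xs.length - start - (l + 1) = fin - start := by omega
    have hrun : runR [] (xs.drop start) (xs.length - start - (l + 1)) =
        runR [c] rest (fin - b) := by
      rw [hdecomp, hKm]
      rw [prefix_run pre [] (fin - start) c rest (by simp) hpre_mem (by simp [hpre_len]; omega)]
      congr 1
      simp [hpre_len]; omega
    have hshield : runR [c] rest (fin - b) =
        ((runR [] rest (fin - b)).1 ++ [c], (runR [] rest (fin - b)).2) := by
      have := shield rest [] (fin - b) c (by
        intro i hi
        simp only [List.length_nil, Nat.add_zero] at hi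
        have hib : b + 1 + i < xs.length := by omega
        have : rest.getD i "" = xs.getD (b + 1 + i) "" := by
          rw [hrest_def, List.getD_eq_getElem _ _ (by simp; omega),
              List.getD_eq_getElem _ _ hib]
          simp [List.getElem_drop]
        rw [this]
        exact habs_le (b + 1 + i) (by omega) (by omega))
      simpa using this
    have hlen := run_len rest [] (fin - b)
    set f := (runR [] rest (fin - b)).1 with hf_def
    set kf := (runR [] rest (fin - b)).2 with hkf_def
    have hrest_len : rest.length = xs.length - (b + 1) := by simp [hrest_def]
    have hkf_le : kf ≤ f.length := by
      simp only [List.length_nil] at hlen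
      omega
    have : resA (xs.drop start) (xs.length - start - (l + 1)) = c :: resA rest (fin - b) := by
      unfold resA
      rw [hrun, hshield]
      simp only [← hf_def, ← hkf_def]
      rw [List.drop_append_of_le_length hkf_le]
      simp
    rw [this]
    have hih := ih (b + 1) (by omega)
    have heq : xs.length - (b + 1) - l = fin - b := by omega
    rw [heq] at hih
    rw [hih]
    rw [gsel]

theorem pop_bridge (r : List String) (k : Nat) (c : String) :
    pvWhilePop r (k : Int) c = ((popR r.reverse k c).1.reverse, ((popR r.reverse k c).2 : Int)) := by
  induction r using List.reverseRecOn generalizing k with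
  | nil =>
    rw [pvWhilePop]
    cases k <;> simp [popR]
  | append_singleton ys y ih =>
    rw [pvWhilePop]
    cases k with
    | zero => simp [popR]
    | succ k =>
      by_cases hy : y < c
      · rw [dif_pos (by
          refine ⟨by positivity, by simp, ?_⟩
          rw [PySem.List.pyGetD_neg_one_append_singleton]
          exact hy)]
        have hc : ((k : Int) + 1 - 1) = (k : Int) := by omega
        simp only [List.dropLast_concat, Nat.cast_succ, hc]
        rw [ih k]
        simp [popR, hy]
      · rw [dif_neg (by
          rintro ⟨_, _, hcon⟩
          rw [PySem.List.pyGetD_neg_one_append_singleton] at hcon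
          exact hy hcon)]
        simp [popR, hy]

theorem run_bridge (cs : List String) : ∀ (r : List String) (k : Nat),
    cs.foldl (fun (st : List String × Int) cifra =>
        let p := pvWhilePop st.1 st.2 cifra
        (p.1 ++ [cifra], p.2)) (r, (k : Int)) =
      ((runR r.reverse cs k).1.reverse, ((runR r.reverse cs k).2 : Int)) := by
  induction cs with
  | nil => intro r k; simp [runR]
  | cons c cs ih =>
    intro r k
    simp only [List.foldl_cons, runR]
    rw [pop_bridge r k c]
    have := ih ((popR r.reverse k c).1.reverse ++ [c]) (popR r.reverse k c).2
    simpa using this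

theorem portA_eq_resA (xs : List String) (L : Int) (h : L ≤ (xs.length : Int)) :
    pronadji_najveci_podniz xs L = PySem.Str.join "" (resA xs ((xs.length : Int) - L).toNat) := by
  simp only [pronadji_najveci_podniz, if_neg (not_lt.mpr h)]
  generalize hkt : ((xs.length : Int) - L).toNat = kt
  have hK : ((xs.length : Int) - L) = (kt : Int) := by omega
  have hres : resA xs kt = ((runR [] xs kt).1.drop (runR [] xs kt).2).reverse := rfl
  rw [hK, run_bridge xs [] kt, hres]
  simp only [List.reverse_nil]
  set p := runR [] xs kt with hp
  by_cases h0 : 0 < p.2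
  · rw [if_pos (Int.natCast_pos.mpr h0)]
    show PySem.Str.join "" (PySem.List.slice p.1.reverse none (some (-((p.2 : Nat) : Int)))) = _
    congr 1
    rw [PySem.List.slice_to_neg_natCast (k := p.2) (xs := p.1.reverse) h0]
    rw [List.reverse_drop]
    simp
  · rw [if_neg (fun hc => absurd (show (0:Int) < (p.2:Int) from hc) (by exact_mod_cast h0))]
    show PySem.Str.join "" p.1.reverse = _
    have h2 : p.2 = 0 := by omega
    rw [h2]
    simp

theorem inner_bridge (xs : List String) (fin : Nat) : ∀ (n j best : Nat), fin + 1 - j = n →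
    (PySem.List.pyRange (j : Int) ((fin : Int) + 1) 1).foldl
      (fun best j =>
        if PySem.List.pyGetD xs best "" < PySem.List.pyGetD xs j "" then j else best) (best : Int) =
    ((argAux xs best j fin : Nat) : Int) := by
  intro n
  induction n with
  | zero =>
    intro j best hn
    rw [PySem.List.pyRange_one_eq_nil (by omega), argAux, if_neg (by omega)]
    rfl
  | succ n ih =>
    intro j best hn
    by_cases hj : j ≤ fin
    · rw [PySem.List.pyRange_one_cons (by omega), argAux, if_pos hj]
      simp only [List.foldl_cons, PySem.List.pyGetD_natCast]
      by_cases hlt : xs.getD best "" < xs.getD j ""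
      · rw [if_pos hlt, if_pos hlt]
        rw [show ((j : Int) + 1) = ((j + 1 : Nat) : Int) by push_cast; ring]
        exact ih (j + 1) j (by omega)
      · rw [if_neg hlt, if_neg hlt]
        rw [show ((j : Int) + 1) = ((j + 1 : Nat) : Int) by push_cast; ring]
        exact ih (j + 1) best (by omega)
    · rw [PySem.List.pyRange_one_eq_nil (by omega), argAux, if_neg hj]
      rfl

theorem outer_bridge (xs : List String) (L : Int) : ∀ (l start : Nat) (acc : List String) (i : Int),
    0 ≤ i → i + l = L → start + l ≤ xs.length →
    ((PySem.List.pyRange i L 1).foldl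
      (fun (st : Int × List String) i =>
        let start := st.1
        let endIdx := (xs.length : Int) - (L - i)
        let best := (PySem.List.pyRange (start + 1) (endIdx + 1) 1).foldl
          (fun best j =>
            if PySem.List.pyGetD xs best "" < PySem.List.pyGetD xs j "" then j
            else best) start
        (best + 1, st.2 ++ [PySem.List.pyGetD xs best ""])) ((start : Int), acc)).2 =
      acc ++ gsel xs start l := by
  intro l
  induction l with
  | zero =>
    intro start acc i h0 hiL hlen
    rw [PySem.List.pyRange_one_eq_nil (by omega), gsel]
    simp
  | succ l ih =>
    intro start acc i h0 hiL hlen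
    rw [PySem.List.pyRange_one_cons (by omega)]
    simp only [List.foldl_cons]
    have hfin : (xs.length : Int) - (L - i) = (((xs.length - (l + 1) : Nat)) : Int) := by
      omega
    rw [hfin]
    set fin := xs.length - (l + 1) with hfin_def
    have hinner := inner_bridge xs fin (fin + 1 - (start + 1)) (start + 1) start rfl
    rw [show ((start : Int) + 1) = ((start + 1 : Nat) : Int) by push_cast; ring, hinner]
    set b := argAux xs start (start + 1) fin with hb_def
    obtain ⟨i1, _, _, _, _⟩ :=
      argAux_spec xs fin (fin + 1 - (start + 1)) (start + 1) start rfl (by omega)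
    have hb2 : b ≤ fin := by rcases i1 with h' | h' <;> omega
    rw [PySem.List.pyGetD_natCast]
    rw [show ((b : Int) + 1) = ((b + 1 : Nat) : Int) by push_cast; ring]
    have := ih (b + 1) (acc ++ [xs.getD b ""]) (i + 1) (by omega) (by omega) (by omega)
    rw [this]
    simp only [gsel]
    rw [← hfin_def, ← hb_def]
    simp

theorem portB_eq_gsel (xs : List String) (L : Int) (h0 : 0 ≤ L) (h : L ≤ (xs.length : Int)) :
    pronadji_najveci_podniz_alt xs L = PySem.Str.join "" (gsel xs 0 L.toNat) := by
  simp only [pronadji_najveci_podniz_alt]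
  congr 1
  have := outer_bridge xs L L.toNat 0 [] 0 le_rfl (by omega) (by omega)
  simpa using this

theorem final_check (xs : List String) (L : Int) (hPre : L ≤ (xs.length : Int)) :
    pronadji_najveci_podniz xs L = pronadji_najveci_podniz_alt xs L := by
  rw [portA_eq_resA xs L hPre]
  by_cases h0 : 0 ≤ L
  · rw [portB_eq_gsel xs L h0 hPre]
    congr 1
    have := stack_eq_gsel xs L.toNat 0 (by omega)
    simp only [List.drop_zero, Nat.sub_zero] at this
    rw [show ((xs.length : Int) - L).toNat = xs.length - L.toNat by omega]
    exact this
  · rw [resA_big xs _ (by omega)]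
    simp only [pronadji_najveci_podniz_alt]
    rw [PySem.List.pyRange_one_eq_nil (by omega)]
    simp

-- ===== VERDICT (by name: the statement is the Claim_ definition above) =====
theorem pronadji_najveci_podniz_spec : Claim_equal_pronadji_najveci_podniz := by
  intro banka_linija ciljana_duzina _hDom hPre
  exact final_check banka_linija ciljana_duzina hPre
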